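-- pv_equiv track=rewrite | github.com/puneeth1999/InterviewPreparation | CodeSignal/Arcade/Intro/5. interestingPolygon.py | shapeArea
-- ===== SOURCE A (Python) =====
-- def shapeArea(n):
--     counter = 1
--     middle_strip = 1
--     shape = 0
--     if(n>1):
--         #to find the middle strip area
--         while(counter < n):
--             middle_strip += 2
--             counter += 1
--         shape = 1
--         s_shape = 1
--         counter = 1
--         #to find the area of other strips on one side
--         while(counter < n-1):
--             s_shape += 2
--             counter += 1
--             shape += s_shape
--         shape *= 2
--     return middle_strip + shape
-- ===== SOURCE B (Python) =====
-- def shapeArea(n):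
--     return 2 * n * (n - 1) + 1 if n > 1 else 1
-- ===== Notes on version B (the rewrite author's own statement) =====
-- stated objective: faster
-- what changed: Replaced the two counting while-loops with the closed-form formula 2*n*(n-1)+1 (keeping A's value 1 for n <= 1).
import Mathlib
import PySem

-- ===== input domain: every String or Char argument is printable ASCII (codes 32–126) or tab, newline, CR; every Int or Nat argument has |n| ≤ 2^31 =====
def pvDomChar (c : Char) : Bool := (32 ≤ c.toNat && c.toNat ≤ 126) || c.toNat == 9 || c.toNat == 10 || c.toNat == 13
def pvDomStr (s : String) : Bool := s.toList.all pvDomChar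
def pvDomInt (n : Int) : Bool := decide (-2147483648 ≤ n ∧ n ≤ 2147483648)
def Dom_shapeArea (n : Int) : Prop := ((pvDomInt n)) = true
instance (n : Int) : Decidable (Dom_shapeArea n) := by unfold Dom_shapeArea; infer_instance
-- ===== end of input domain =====

-- B replaces A's two counting while-loops by the closed-form 2*n*(n-1)+1 (objective: faster, O(1) vs O(n)).

-- ===== PORT A =====
-- A's first while loop: while counter < n: middle_strip += 2; counter += 1
def shapeAreaLoop1 (n counter ms : Int) : Int :=
  if counter < n then shapeAreaLoop1 n (counter + 1) (ms + 2) else ms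
termination_by (n - counter).toNat
decreasing_by omega

-- A's second while loop: while counter < n-1: s_shape += 2; counter += 1; shape += s_shape
def shapeAreaLoop2 (n counter s_shape shape : Int) : Int :=
  if counter < n - 1 then shapeAreaLoop2 n (counter + 1) (s_shape + 2) (shape + (s_shape + 2)) else shape
termination_by (n - 1 - counter).toNat
decreasing_by omega

def shapeArea (n : Int) : Int :=
  if n > 1 then
    shapeAreaLoop1 n 1 1 + shapeAreaLoop2 n 1 1 1 * 2
  else
    1 + 0

-- ===== PORT B =====
def shapeArea_alt (n : Int) : Int :=
  if n > 1 then 2 * n * (n - 1) + 1 else 1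

-- ===== PRECONDITION & SPEC =====
def Spec_shapeArea (n : Int) (out : Int) : Prop := out = shapeArea_alt n
instance (n : Int) (out : Int) : Decidable (Spec_shapeArea n out) := by unfold Spec_shapeArea; infer_instance

-- ===== CLAIM (what is proved, stated in full; the proofs are below) =====
def Claim_equal_shapeArea : Prop := ∀ (n : Int), Dom_shapeArea n → Spec_shapeArea n (shapeArea n)

-- ===== LEMMAS AND PROOFS =====
theorem shapeAreaLoop1_eq (k : Nat) (c ms : Int) :
    shapeAreaLoop1 (c + k) c ms = ms + 2 * k := by
  induction k generalizing c ms with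
  | zero => rw [shapeAreaLoop1]; simp
  | succ k ih =>
    rw [shapeAreaLoop1]
    have hlt : c < c + (k + 1 : Nat) := by push_cast; omega
    have harg : c + ((k + 1 : Nat) : Int) = (c + 1) + (k : Nat) := by push_cast; ring
    rw [if_pos hlt, harg, ih]
    push_cast; ring

theorem shapeAreaLoop2_eq (k : Nat) (c s sh : Int) :
    shapeAreaLoop2 (c + k + 1) c s sh = sh + k * s + k * (k + 1) := by
  induction k generalizing c s sh with
  | zero => rw [shapeAreaLoop2]; simp
  | succ k ih =>
    rw [shapeAreaLoop2]
    have hlt : c < c + ((k + 1 : Nat) : Int) + 1 - 1 := by push_cast; omega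
    have harg : c + ((k + 1 : Nat) : Int) + 1 = (c + 1) + (k : Nat) + 1 := by push_cast; ring
    rw [if_pos hlt, harg, ih]
    push_cast; ring

-- ===== VERDICT (by name: the statement is the Claim_ definition above) =====
theorem shapeArea_spec : Claim_equal_shapeArea := by
  intro n _
  unfold Spec_shapeArea shapeArea shapeArea_alt
  by_cases h : n > 1
  · rw [if_pos h, if_pos h]
    obtain ⟨k, hk⟩ : ∃ k : Nat, n = 1 + (k : Int) + 1 := ⟨(n - 2).toNat, by omega⟩
    subst hk
    have h1 : (1 : Int) + (k : Int) + 1 = 1 + ((k + 1 : Nat) : Int) := by push_cast; ring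
    rw [h1, shapeAreaLoop1_eq, ← h1, shapeAreaLoop2_eq]
    push_cast; ring
  · rw [if_neg h, if_neg h]; ring
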